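-- pv_equiv track=rewrite | github.com/seregaseregovich/Python_files_in_Git | Строки. Применение рекурсии в строках.py | rec
-- ===== SOURCE A (Python) =====
-- def rec(x):
--     if len(x) == 1:
--         if x != '(':
--             return x + x
--         return '()'
--     if x[0] != '(':
--         return x[0] + rec(x[1:]) + x[0]
--     return '(' + rec(x[1:]) + ')'
-- ===== SOURCE B (Python) =====
-- def rec(x):
--     return x + ''.join(')' if c == '(' else c for c in reversed(x))
-- ===== Notes on version B (the rewrite author's own statement) =====
-- stated objective: faster
-- what changed: Replaced the O(n^2) recursion (slicing and re-concatenating at every level) with one linear pass: the string itself followed by its reversal with each open parenthesis mapped to a close parenthesis; Pre_ excludes only the empty string, on which A raises IndexError.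
import Mathlib
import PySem

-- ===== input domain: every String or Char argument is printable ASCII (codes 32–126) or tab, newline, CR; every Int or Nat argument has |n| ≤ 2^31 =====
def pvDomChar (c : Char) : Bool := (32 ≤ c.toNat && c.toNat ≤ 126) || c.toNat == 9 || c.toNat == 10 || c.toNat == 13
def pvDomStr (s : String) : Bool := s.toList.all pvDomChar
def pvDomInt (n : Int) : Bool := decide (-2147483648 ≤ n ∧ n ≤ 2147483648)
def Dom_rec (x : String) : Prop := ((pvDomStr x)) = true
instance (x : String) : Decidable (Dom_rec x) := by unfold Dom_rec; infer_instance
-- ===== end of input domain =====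

-- B replaces A's quadratic recursion with one linear pass (string + mapped reversal); return value only.

-- ===== PORT A =====
-- literal transliteration of A's recursion over the characters (x[1:] = the tail);
-- the [] case is unreachable under Pre_rec (Python raises IndexError on '').
def recChars : List Char → List Char
  | [] => []
  | [c] => if c ≠ '(' then [c, c] else ['(', ')']
  | c :: rest =>
      if c ≠ '(' then c :: (recChars rest ++ [c])
      else '(' :: (recChars rest ++ [')'])

def rec (x : String) : String := String.mk (recChars x.toList)

-- ===== PORT B =====
def rec_alt (x : String) : String :=
  String.mk (x.toList ++ (x.toList.reverse.map (fun c => if c = '(' then ')' else c)))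

-- ===== PRECONDITION & SPEC =====
-- A raises IndexError on the empty string; Pre_ excludes exactly that input.
def Pre_rec (x : String) : Prop := x ≠ ""
instance (x : String) : Decidable (Pre_rec x) := by unfold Pre_rec; infer_instance
def pvWitness_rec : String := "a(b"

def Spec_rec (x : String) (out : String) : Prop := out = rec_alt x
instance (x : String) (out : String) : Decidable (Spec_rec x out) := by unfold Spec_rec; infer_instance

-- ===== CLAIM (what is proved, stated in full; the proofs are below) =====
def Claim_equal_rec : Prop := ∀ (x : String), Dom_rec x → Pre_rec x → Spec_rec x (rec x)

-- ===== LEMMAS AND PROOFS =====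
lemma recChars_eq (l : List Char) (h : l ≠ []) :
    recChars l = l ++ l.reverse.map (fun c => if c = '(' then ')' else c) := by
  induction l with
  | nil => exact absurd rfl h
  | cons c rest ih =>
    cases rest with
    | nil =>
      by_cases hc : c = '('
      · subst hc; simp [recChars]
      · simp [recChars, hc]
    | cons d tl =>
      have htl : (d :: tl) ≠ [] := by simp
      by_cases hc : c = '('
      · subst hc
        simp [recChars, ih htl]
      · simp [recChars, hc, ih htl]

lemma toList_ne_nil {x : String} (h : x ≠ "") : x.toList ≠ [] := by
  intro hn
  apply h
  have := congrArg String.ofList hn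
  simpa using this

-- ===== VERDICT (by name: the statement is the Claim_ definition above) =====
theorem rec_spec : Claim_equal_rec := by
  intro x _ hpre
  unfold Spec_rec rec rec_alt
  rw [recChars_eq x.toList (toList_ne_nil hpre)]
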